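-- pv_equiv track=rewrite | github.com/nikdimentiy/mint | CodeWars/are_similar.py | solution
-- ===== SOURCE A (Python) =====
-- def solution(a, b):
--     """
--     Determine if two strings are anagrams of each other with at most two differences.
--
--     Args:
--         a (str): The first string.
--         b (str): The second string.
--
--     Returns:
--         bool: True if the strings are anagrams with at most two differences, False otherwise.
--     """
--     # Check if the sorted strings are different
--     if sorted(a) != sorted(b):
--         # If sorted strings are different, they cannot be anagrams
--         return False
--
--     # Count the number of differences between the strings
--     count = 0
--     for i in range(len(a)):
--         # Check if the characters at the same position are different
--         if a[i] != b[i]: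
--             count += 1
--
--     # If the count of differences is less than or equal to 2, return True, else False
--     return count <= 2
-- ===== SOURCE B (Python) =====
-- def solution(a, b):
--     # One pass, no sort: classify the positional mismatches directly.
--     if len(a) != len(b):
--         return False
--     d = [(x, y) for x, y in zip(a, b) if x != y]
--     if not d:
--         return True
--     if len(d) != 2:
--         return False
--     (x1, y1), (x2, y2) = d
--     return x1 == y2 and x2 == y1
-- ===== Notes on version B (the rewrite author's own statement) =====
-- stated objective: alternative
-- what changed: B drops both sorts: it collects the positional mismatch pairs in one zip pass and decides by their count (0 mismatches: True; 2 mismatches: True iff they form a transposition; otherwise False), which is provably equivalent to A's anagram-check-plus-mismatch-count.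
import Mathlib
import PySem

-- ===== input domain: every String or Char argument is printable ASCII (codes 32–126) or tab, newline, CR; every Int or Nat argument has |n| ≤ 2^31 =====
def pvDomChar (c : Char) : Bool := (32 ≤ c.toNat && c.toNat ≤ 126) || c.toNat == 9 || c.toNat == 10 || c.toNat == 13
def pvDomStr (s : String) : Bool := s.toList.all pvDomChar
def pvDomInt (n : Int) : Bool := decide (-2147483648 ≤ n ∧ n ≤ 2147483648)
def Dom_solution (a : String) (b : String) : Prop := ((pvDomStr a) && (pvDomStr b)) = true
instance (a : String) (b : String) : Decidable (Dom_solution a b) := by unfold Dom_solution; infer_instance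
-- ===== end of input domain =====

-- B replaces A's two sorts by a single zip pass that classifies the positional mismatches (0 → True, 2 forming a transposition → True, else False).

-- ===== PORT A =====
def solution (a : String) (b : String) : Bool :=
  let la := a.toList
  let lb := b.toList
  -- if sorted(a) != sorted(b): return False
  if (PySem.List.sorted la (fun x => x) false) ≠ (PySem.List.sorted lb (fun x => x) false) then
    false
  else
    -- count = 0; for i in range(len(a)): if a[i] != b[i]: count += 1
    let count : Int := (List.range la.length).foldl
      (fun (c : Int) (i : Nat) =>
        if PySem.List.pyGet? la (i : Int) ≠ PySem.List.pyGet? lb (i : Int) then c + 1 else c) 0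
    -- return count <= 2
    decide (count ≤ 2)

-- ===== PORT B =====
def solution_alt (a : String) (b : String) : Bool :=
  let la := a.toList
  let lb := b.toList
  if la.length ≠ lb.length then false
  else
    match (la.zip lb).filter (fun p => p.1 != p.2) with
    | [] => true
    | [(x1, y1), (x2, y2)] => x1 == y2 && x2 == y1
    | _ => false

-- ===== PRECONDITION & SPEC =====
def Spec_solution (a : String) (b : String) (out : Bool) : Prop := out = solution_alt a b
instance (a : String) (b : String) (out : Bool) : Decidable (Spec_solution a b out) := by unfold Spec_solution; infer_instance

-- ===== CLAIM (what is proved, stated in full; the proofs are below) =====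
def Claim_equal_solution : Prop := ∀ (a : String) (b : String), Dom_solution a b → Spec_solution a b (solution a b)

-- ===== LEMMAS AND PROOFS =====

-- [x1,x2] is a permutation of [y1,y2] iff componentwise equal or swapped.
lemma pv_pair_perm (x1 x2 y1 y2 : Char) :
    ([x1, x2].Perm [y1, y2]) ↔ ((x1 = y1 ∧ x2 = y2) ∨ (x1 = y2 ∧ x2 = y1)) := by
  constructor
  · intro h
    have hx : x1 = y1 ∨ x1 = y2 := by
      have := h.mem_iff (a := x1); simp at this; tauto
    rcases hx with h1 | h1
    · subst h1
      have h2 : [x2].Perm [y2] := (List.perm_cons x1).mp h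
      left; exact ⟨rfl, by simpa [List.perm_singleton] using h2⟩
    · subst h1
      have hsw : ([y1, x1] : List Char).Perm [x1, y1] := List.Perm.swap x1 y1 []
      have h2 : [x2].Perm [y1] := (List.perm_cons x1).mp (h.trans hsw)
      right; exact ⟨rfl, by simpa [List.perm_singleton] using h2⟩
  · rintro (⟨rfl, rfl⟩ | ⟨rfl, rfl⟩)
    · exact List.Perm.refl _
    · exact List.Perm.swap x2 x1 []

-- the multiset of f-images splits along the mismatch filter
lemma pv_filter_map_multiset (l : List (Char × Char)) (f : Char × Char → Char) :
    (↑(l.map f) : Multiset Char)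
      = ↑((l.filter (fun p => p.1 != p.2)).map f)
        + ↑((l.filter (fun p => !(p.1 != p.2))).map f) := by
  have h := (List.filter_append_perm (fun p => p.1 != p.2) l).map f
  rw [List.map_append] at h
  rw [← Multiset.coe_eq_coe.mpr h, Multiset.coe_add]

-- on matched pairs, fst and snd agree
lemma pv_matched_eq (l : List (Char × Char)) :
    (l.filter (fun p => !(p.1 != p.2))).map Prod.fst
      = (l.filter (fun p => !(p.1 != p.2))).map Prod.snd := by
  apply List.map_congr_left
  intro p hp
  rcases List.mem_filter.mp hp with ⟨-, hb⟩
  simpa using hb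

-- a is a permutation of b iff the mismatch columns are permutations of each other
lemma pv_mismatch_perm (la lb : List Char) (h : la.length = lb.length) :
    la.Perm lb ↔
      (((la.zip lb).filter (fun p => p.1 != p.2)).map Prod.fst).Perm
      (((la.zip lb).filter (fun p => p.1 != p.2)).map Prod.snd) := by
  have h1 : (la.zip lb).map Prod.fst = la := List.map_fst_zip (le_of_eq h)
  have h2 : (la.zip lb).map Prod.snd = lb := List.map_snd_zip (le_of_eq h.symm)
  have key : ((↑((la.zip lb).map Prod.fst) : Multiset Char) = ↑((la.zip lb).map Prod.snd)) ↔
      ((↑(((la.zip lb).filter (fun p => p.1 != p.2)).map Prod.fst) : Multiset Char)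
        = ↑(((la.zip lb).filter (fun p => p.1 != p.2)).map Prod.snd)) := by
    rw [pv_filter_map_multiset (la.zip lb) Prod.fst, pv_filter_map_multiset (la.zip lb) Prod.snd,
      pv_matched_eq, add_left_inj]
  rw [h1, h2] at key
  rw [← Multiset.coe_eq_coe, ← Multiset.coe_eq_coe]
  exact key

-- A's loop counts exactly the mismatch pairs
lemma pv_countP_range (la lb : List Char) (h : la.length = lb.length) :
    (List.range la.length).countP (fun i => la[i]? != lb[i]?)
      = ((la.zip lb).filter (fun p => p.1 != p.2)).length := by
  induction la generalizing lb with
  | nil => cases lb with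
    | nil => simp
    | cons y lb => simp at h
  | cons x la ih =>
    cases lb with
    | nil => simp at h
    | cons y lb =>
      simp only [List.length_cons, Nat.add_right_cancel_iff] at h
      rw [List.length_cons, List.range_succ_eq_map]
      simp only [List.countP_cons, List.countP_map, List.zip_cons_cons, List.filter_cons,
        Function.comp_def, List.getElem?_cons_succ, List.getElem?_cons_zero]
      rw [ih lb h]
      by_cases hxy : x = y <;> simp [hxy]

theorem pv_main (a b : String) : solution a b = solution_alt a b := by
  simp only [solution, solution_alt]
  set la := a.toList with hla
  set lb := b.toList with hlb
  by_cases hlen : la.length = lb.length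
  · have hperm := pv_mismatch_perm la lb hlen
    have hcount : (List.range la.length).foldl
        (fun (c : Int) (i : Nat) =>
          if PySem.List.pyGet? la (i : Int) ≠ PySem.List.pyGet? lb (i : Int) then c + 1 else c) 0
        = (((la.zip lb).filter (fun p => p.1 != p.2)).length : Int) := by
      have hfun : (fun (c : Int) (i : Nat) =>
            if PySem.List.pyGet? la (i : Int) ≠ PySem.List.pyGet? lb (i : Int) then c + 1 else c)
          = (fun (c : Int) (i : Nat) => if (la[i]? != lb[i]?) = true then c + 1 else c) := by
        funext c i
        simp [PySem.List.pyGet?_natCast, bne_iff_ne]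
      rw [hfun, PySem.List.foldl_count_if, pv_countP_range la lb hlen]
      simp
    rw [if_neg (not_not_intro hlen)]
    rcases hd : (la.zip lb).filter (fun p => p.1 != p.2) with _ | ⟨⟨x1, y1⟩, _ | ⟨⟨x2, y2⟩, _ | ⟨p3, rest⟩⟩⟩
    · -- no mismatch: both sides True
      rw [hd] at hperm
      have hp : la.Perm lb := hperm.mpr (by simp)
      have hs : (PySem.List.sorted la (fun x => x) false) = (PySem.List.sorted lb (fun x => x) false) :=
        (PySem.List.sorted_id_eq_sorted_id_iff_perm la lb).mpr hp
      rw [if_neg (not_not_intro hs), hcount, hd]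
      simp
    · -- one mismatch: not an anagram, both sides False
      have hm : (x1, y1) ∈ (la.zip lb).filter (fun p => p.1 != p.2) := by rw [hd]; simp
      have hne : x1 ≠ y1 := by simpa using (List.mem_filter.mp hm).2
      rw [hd] at hperm
      have hnp : ¬ la.Perm lb := fun hp => hne (by simpa [List.perm_singleton] using hperm.mp hp)
      have hs : (PySem.List.sorted la (fun x => x) false) ≠ (PySem.List.sorted lb (fun x => x) false) :=
        fun he => hnp ((PySem.List.sorted_id_eq_sorted_id_iff_perm la lb).mp he)
      rw [if_pos hs, hd]
    · -- two mismatches: anagram iff they form a transposition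
      have hm1 : (x1, y1) ∈ (la.zip lb).filter (fun p => p.1 != p.2) := by rw [hd]; simp
      have hm2 : (x2, y2) ∈ (la.zip lb).filter (fun p => p.1 != p.2) := by rw [hd]; simp
      have hne1 : x1 ≠ y1 := by simpa using (List.mem_filter.mp hm1).2
      rw [hd] at hperm
      have hperm2 : la.Perm lb ↔ (x1 = y2 ∧ x2 = y1) := by
        rw [hperm]
        simp only [List.map_cons, List.map_nil]
        rw [pv_pair_perm]
        constructor
        · rintro (⟨h1, h2⟩ | h)
          · exact absurd h1 hne1
          · exact h
        · exact Or.inr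
      by_cases hsw : x1 = y2 ∧ x2 = y1
      · have hp : la.Perm lb := hperm2.mpr hsw
        have hs : (PySem.List.sorted la (fun x => x) false) = (PySem.List.sorted lb (fun x => x) false) :=
          (PySem.List.sorted_id_eq_sorted_id_iff_perm la lb).mpr hp
        rw [if_neg (not_not_intro hs), hcount, hd]
        simp [hsw.1, hsw.2]
      · have hnp : ¬ la.Perm lb := fun hp => hsw (hperm2.mp hp)
        have hs : (PySem.List.sorted la (fun x => x) false) ≠ (PySem.List.sorted lb (fun x => x) false) :=
          fun he => hnp ((PySem.List.sorted_id_eq_sorted_id_iff_perm la lb).mp he)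
        have hbe : (x1 == y2 && x2 == y1) = false := by
          rcases Decidable.not_and_iff_or_not.mp hsw with h | h <;> simp [h]
        rw [if_pos hs, hd]
        exact hbe.symm
    · -- three or more mismatches: count > 2, both sides False
      rw [hcount, hd]
      have h3 : ¬ (((((x1, y1) :: (x2, y2) :: p3 :: rest).length : Nat) : Int) ≤ 2) := by
        simp only [List.length_cons]
        push_cast
        omega
      split_ifs with h1
      · rfl
      · rw [decide_eq_false h3]
  · have hs : (PySem.List.sorted la (fun x => x) false) ≠ (PySem.List.sorted lb (fun x => x) false) :=
      fun he => hlen ((PySem.List.sorted_id_eq_sorted_id_iff_perm la lb).mp he).length_eq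
    rw [if_pos hs, if_pos hlen]

-- ===== VERDICT (by name: the statement is the Claim_ definition above) =====
theorem solution_spec : Claim_equal_solution := by
  intro a b _
  unfold Spec_solution
  exact pv_main a b
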